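-- pv_equiv track=rewrite | github.com/Dan-Codes/TickerSym | nltkAnalysis.py | removeTicker
-- ===== SOURCE A (Python) =====
-- def removeTicker(tweet):
--     newArray = []
--     i = 0
--     while i < len(tweet):
--         if tweet[i] != "$" and tweet[i] != "#":
--             newArray.append(tweet[i])
--             i += 1
--         else:
--             i += 2
--
--     return newArray
-- ===== SOURCE B (Python) =====
-- def removeTicker(tweet):
--     newArray = []
--     skip = False
--     for ch in tweet:
--         if skip:
--             skip = False
--         elif ch == "$" or ch == "#":
--             skip = True
--         else:
--             newArray.append(ch)
--     return newArray
-- ===== Notes on version B (the rewrite author's own statement) =====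
-- stated objective: idiomatic
-- what changed: Replaced the index-jumping while loop with a single for-each pass carrying a boolean skip flag (a marker sets the flag; the next element clears it and is dropped).
import Mathlib
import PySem

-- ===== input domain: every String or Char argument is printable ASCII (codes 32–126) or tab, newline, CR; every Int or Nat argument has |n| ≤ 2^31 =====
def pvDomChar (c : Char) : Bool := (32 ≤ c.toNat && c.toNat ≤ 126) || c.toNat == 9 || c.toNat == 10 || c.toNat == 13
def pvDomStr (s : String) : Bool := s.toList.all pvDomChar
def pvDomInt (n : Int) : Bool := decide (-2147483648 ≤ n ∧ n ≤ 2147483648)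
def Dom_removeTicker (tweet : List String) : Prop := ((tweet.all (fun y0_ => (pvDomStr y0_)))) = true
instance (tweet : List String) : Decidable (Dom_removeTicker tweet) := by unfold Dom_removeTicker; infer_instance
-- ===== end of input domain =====

-- B replaces A's index-jumping while loop with a single for-each pass and a boolean skip flag (idiomatic; same cost).


-- ===== PORT A =====
-- A's while loop advances its index by 1 (keeping the element) or by 2 (skipping the
-- element after a marker); ported as recursion on the remaining suffix, where `i += 2`
-- is dropping one further element of the tail.
def removeTicker (tweet : List String) : List String :=
  match tweet with
  | [] => []
  | x :: rest =>
    if x ≠ "$" ∧ x ≠ "#" then x :: removeTicker rest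
    else removeTicker (rest.drop 1)
termination_by tweet.length
decreasing_by
  all_goals simp

-- ===== PORT B =====
-- one fold over the tweet carrying (accumulated output, skip flag)
def removeTicker_alt (tweet : List String) : List String :=
  (tweet.foldl
    (fun (st : List String × Bool) ch =>
      if st.2 then (st.1, false)
      else if ch = "$" ∨ ch = "#" then (st.1, true)
      else (st.1 ++ [ch], false))
    ([], false)).1

-- ===== PRECONDITION & SPEC =====
def Spec_removeTicker (tweet : List String) (out : List String) : Prop := out = removeTicker_alt tweet
instance (tweet : List String) (out : List String) : Decidable (Spec_removeTicker tweet out) := by unfold Spec_removeTicker; infer_instance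

-- ===== CLAIM (what is proved, stated in full; the proofs are below) =====
def Claim_equal_removeTicker : Prop := ∀ (tweet : List String), Dom_removeTicker tweet → Spec_removeTicker tweet (removeTicker tweet)

-- ===== LEMMAS AND PROOFS =====

-- the fold started with (acc, false) produces acc ++ removeTicker l (and a cleared flag)
theorem foldl_skip_false (l : List String) : ∀ (acc : List String),
    (l.foldl
      (fun (st : List String × Bool) ch =>
        if st.2 then (st.1, false)
        else if ch = "$" ∨ ch = "#" then (st.1, true)
        else (st.1 ++ [ch], false))
      (acc, false)).1
    = acc ++ removeTicker l := by
  induction l using removeTicker.induct with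
  | case1 => intro acc; simp [removeTicker]
  | case2 x rest hx ih =>
    intro acc
    have hx1 : x ≠ "$" := hx.1
    have hx2 : x ≠ "#" := hx.2
    simp [List.foldl, hx1, hx2, removeTicker, ih]
  | case3 x rest hx ih =>
    intro acc
    have hor : x = "$" ∨ x = "#" := by
      by_cases h1 : x = "$"
      · exact Or.inl h1
      · by_cases h2 : x = "#"
        · exact Or.inr h2
        · exact absurd ⟨h1, h2⟩ hx
    cases rest with
    | nil =>
      rcases hor with h | h <;> subst h <;> simp [List.foldl, removeTicker]
    | cons y rest' =>
      rcases hor with h | h <;> subst h <;>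
        simpa [List.foldl, removeTicker] using ih acc

-- ===== VERDICT (by name: the statement is the Claim_ definition above) =====
theorem removeTicker_spec : Claim_equal_removeTicker := by
  intro tweet _
  unfold Spec_removeTicker removeTicker_alt
  rw [foldl_skip_false tweet []]
  simp
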